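-- pv_equiv track=rewrite | github.com/Green0v0/Algorithm | Woosang/구현/신규 아이디 추천.py | solution
-- ===== SOURCE A (Python) =====
-- def solution(new_id):
--     # 1단계
--     new_id = new_id.lower()
--
--     # 2단계
--     del_list = []
--     for i in range(len(new_id)):
--         if new_id[i].isalnum() or new_id[i] in ['-', '_', '.']:
--             continue
--         else:
--             del_list.append(new_id[i])
--
--     while del_list:
--         i = del_list.pop()
--         new_id = new_id.replace(i, '')
--
--     # 3단계
--     for i in range(1, len(new_id)):
--         if new_id[i] == '.' and new_id[i-1] == new_id[i]:
--             del_list.append(i)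
--     new_id = list(new_id)
--
--     while del_list:
--         i = del_list.pop()
--         new_id.pop(i)
--
--     # 4단계
--     def remove_comma(new_id):
--         if len(new_id) != 0:
--             if new_id[0] == '.':
--                 new_id = new_id[1:]
--             elif new_id[-1] == '.':
--                 new_id = new_id[:-1]
--         return new_id
--     new_id = remove_comma(new_id)
--     new_id = remove_comma(new_id)
--     # 5단계, 6단계
--     if len(new_id) == 0:
--         new_id.append('a')
--     elif len(new_id) >= 16:
--         new_id = new_id[:15]
--     new_id = remove_comma(new_id)
--
--     # 7단계
--     if len(new_id) <= 2:
--         new_id.append(new_id[-1]*(3-len(new_id)))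
--
--     return ''.join(new_id)
-- ===== SOURCE B (Python) =====
-- def solution(new_id):
--     # One fused left-to-right pass: filter allowed chars and collapse '..' runs,
--     # then strip edge dots, pad/truncate.
--     out = []
--     prev = None
--     for c in new_id.lower():
--         if c.isalnum() or c in '-_.':
--             if not (c == '.' and prev == '.'):
--                 out.append(c)
--             prev = c
--     s = ''.join(out).strip('.')
--     if not s:
--         s = 'a'
--     elif len(s) >= 16:
--         s = s[:15].strip('.')
--     if len(s) <= 2:
--         s = s + s[-1] * (3 - len(s))
--     return s
-- ===== Notes on version B (the rewrite author's own statement) =====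
-- stated objective: simpler
-- what changed: A does four separate cleanup passes (collect bad chars by index, repeated str.replace removals, collect duplicate-dot indices, pop them one by one); B fuses filtering and dot-collapsing into one left-to-right pass tracking the previous seen character, then strips edge dots and truncates/pads with slicing.
import Mathlib
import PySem

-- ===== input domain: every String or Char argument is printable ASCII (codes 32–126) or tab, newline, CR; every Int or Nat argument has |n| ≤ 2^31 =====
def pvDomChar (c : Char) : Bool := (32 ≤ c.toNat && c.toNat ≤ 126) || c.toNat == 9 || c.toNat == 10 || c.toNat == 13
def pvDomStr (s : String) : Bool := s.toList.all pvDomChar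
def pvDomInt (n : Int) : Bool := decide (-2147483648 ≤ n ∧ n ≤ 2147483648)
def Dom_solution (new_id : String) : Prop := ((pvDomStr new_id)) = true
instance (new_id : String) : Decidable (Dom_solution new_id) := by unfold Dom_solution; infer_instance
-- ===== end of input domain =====

-- B fuses A's four cleanup passes into one accumulator pass plus strip/slice; objective: simpler (same observable behaviour).

-- ===== PORT A =====
def pvKeep (c : Char) : Bool := PySem.Chars.isalnum c || c == '-' || c == '_' || c == '.'

-- remove_comma: drop a leading '.', else a trailing '.'
def pvRemoveComma (s : List Char) : List Char :=
  if s.length ≠ 0 then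
    if PySem.List.pyGet? s 0 == some '.' then PySem.List.slice s (some 1) none
    else if PySem.List.pyGet? s (-1) == some '.' then PySem.List.slice s none (some (-1))
    else s
  else s

def solution (new_id : String) : String :=
  -- step 1
  let s0 := PySem.Chars.lower new_id.toList
  -- step 2: collect the disallowed characters by an index loop
  let del := (PySem.List.pyRange 0 (PySem.List.len s0) 1).foldl
      (fun acc i => if pvKeep (PySem.List.pyGetD s0 i ' ') then acc else acc ++ [PySem.List.pyGetD s0 i ' ']) []
  -- while del_list: i = del_list.pop(); new_id = new_id.replace(i, '') — pop() walks del from the end (foldr);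
  -- str.replace(c, '') for a one-char c removes every occurrence of c: exactly List.filter (· != c)
  let s1 := del.foldr (fun c s => s.filter (fun x => !(x == c))) s0
  -- step 3: indices of a '.' repeating its predecessor, popped from the end (largest first)
  let idxs := (PySem.List.pyRange 1 (PySem.List.len s1) 1).foldl
      (fun acc i => if PySem.List.pyGet? s1 i == some '.' && PySem.List.pyGet? s1 (i-1) == PySem.List.pyGet? s1 i
                    then acc ++ [i] else acc) ([] : List Int)
  let s2 := idxs.foldr (fun i s => ((PySem.List.pop? s i).map (·.2)).getD s) s1
  -- step 4
  let s3 := pvRemoveComma (pvRemoveComma s2)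
  -- steps 5, 6
  let s4 := if s3.length = 0 then s3 ++ ['a']
            else if 16 ≤ s3.length then PySem.List.slice s3 none (some 15) else s3
  let s5 := pvRemoveComma s4
  -- step 7 appends the ONE string new_id[-1]*(3-len(new_id)); ''.join flattens it, so append the replicated char
  let s6 := if s5.length ≤ 2 then s5 ++ List.replicate (3 - s5.length) (PySem.List.pyGetD s5 (-1) ' ') else s5
  String.ofList s6

-- ===== PORT B =====
def solution_alt (new_id : String) : String :=
  -- one pass: keep allowed chars, skipping a '.' whose previously seen char was '.'
  let scanned := (PySem.Chars.lower new_id.toList).foldl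
      (fun (st : List Char × Option Char) c =>
        if pvKeep c then
          (if c == '.' && st.2 == some '.' then st.1 else st.1 ++ [c], some c)
        else st) ([], none)
  let s := PySem.Chars.stripChars scanned.1 ['.']
  let s := if s.length = 0 then ['a']
           else if 16 ≤ s.length then PySem.Chars.stripChars (s.take 15) ['.'] else s
  let s := if s.length ≤ 2 then s ++ List.replicate (3 - s.length) (PySem.List.pyGetD s (-1) ' ') else s
  String.ofList s

-- ===== PRECONDITION & SPEC =====
def Spec_solution (new_id : String) (out : String) : Prop := out = solution_alt new_id
instance (new_id : String) (out : String) : Decidable (Spec_solution new_id out) := by unfold Spec_solution; infer_instance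

-- ===== CLAIM (what is proved, stated in full; the proofs are below) =====
def Claim_equal_solution : Prop := ∀ (new_id : String), Dom_solution new_id → Spec_solution new_id (solution new_id)

-- ===== LEMMAS AND PROOFS =====

-- the collapsed string: pd = "previously seen character was a dot"
def pvGB (pd : Bool) : List Char → List Char
  | [] => []
  | c :: t => if c == '.' && pd then pvGB (c == '.') t else c :: pvGB (c == '.') t

-- 0-based positions (ascending) that A's step 3 deletes
def pvBadN (pd : Bool) : List Char → List Nat
  | [] => []
  | c :: t => (if c == '.' && pd then [0] else []) ++ (pvBadN (c == '.') t).map (· + 1)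

def pvPopf (i : Int) (s : List Char) : List Char := ((PySem.List.pop? s i).map (·.2)).getD s

def pvR (a b : Char) : Prop := ¬(a = '.' ∧ b = '.')

theorem pv_del_eq (l : List Char) (acc : List Char) :
    l.foldl (fun acc c => if pvKeep c then acc else acc ++ [c]) acc = acc ++ l.filter (fun c => !pvKeep c) := by
  induction l generalizing acc with
  | nil => simp
  | cons c t ih =>
    by_cases h : pvKeep c <;> simp [h, ih]

theorem pv_repl_eq (dl : List Char) (s : List Char) :
    dl.foldr (fun c s => s.filter (fun x => !(x == c))) s = s.filter (fun x => !(dl.contains x)) := by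
  induction dl generalizing s with
  | nil => simp
  | cons c dl ih =>
    simp only [List.foldr_cons, ih, List.filter_filter]
    apply List.filter_congr
    intro x _
    by_cases h : x = c
    · simp [h]
    · simp [h]

theorem pv_filter_keep (s : List Char) :
    s.filter (fun x => !((s.filter (fun c => !pvKeep c)).contains x)) = s.filter pvKeep := by
  apply List.filter_congr
  intro x hx
  by_cases h : pvKeep x <;> simp [h, hx]

theorem pv_pyIdx_nat (n m : Nat) : PySem.List.pyIdx? n (m : Int) = if m < n then some m else none := by
  simp [PySem.List.pyIdx?]

theorem pv_pop_succ (c : Char) (l : List Char) (m : Nat) :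
    PySem.List.pop? (c :: l) ((m : Int) + 1) = (PySem.List.pop? l m).map (fun r => (r.1, c :: r.2)) := by
  have h : ((m : Int) + 1) = ((m + 1 : Nat) : Int) := by push_cast; ring
  rw [h]
  simp only [PySem.List.pop?, pv_pyIdx_nat]
  by_cases hm : m < l.length
  · simp [hm, Nat.succ_lt_succ hm]
  · simp [hm]

theorem pv_popf_succ (c : Char) (l : List Char) (m : Nat) :
    pvPopf ((m : Int) + 1) (c :: l) = c :: pvPopf (m : Int) l := by
  unfold pvPopf
  rw [pv_pop_succ]
  cases PySem.List.pop? l (m : Int) <;> simp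

theorem pv_popf_shift (M : List Nat) (c : Char) (t : List Char) :
    (((M.map (· + 1) : List Nat)).map (fun k : Nat => (k : Int))).foldr pvPopf (c :: t) =
      c :: (M.map (fun k : Nat => (k : Int))).foldr pvPopf t := by
  induction M with
  | nil => simp
  | cons m M ih =>
    have h1 : ((m + 1 : Nat) : Int) = (m : Int) + 1 := by push_cast; ring
    rw [List.map_cons, List.map_cons, List.foldr_cons, List.map_cons, List.foldr_cons, ih, h1,
      pv_popf_succ]

theorem pv_pop_gb (pd : Bool) (s : List Char) :
    ((pvBadN pd s).map (fun k : Nat => (k : Int))).foldr pvPopf s = pvGB pd s := by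
  induction s generalizing pd with
  | nil => simp [pvBadN, pvGB]
  | cons c t ih =>
    simp only [pvBadN, pvGB, List.map_append, List.foldr_append, pv_popf_shift]
    by_cases h : (c == '.' && pd) = true
    · simp only [h, if_true]
      simp [pvPopf, PySem.List.pop?_zero_cons, ih]
    · simp only [h]
      simp [ih]

theorem pv_idx_eq (c : Char) (t : List Char) :
    (List.range t.length).filter
        (fun k => (t[k]? == some '.') && ((c :: t)[k]? == t[k]?)) = pvBadN (c == '.') t := by
  induction t generalizing c with
  | nil => simp [pvBadN]
  | cons d u ih =>
    rw [List.length_cons, List.range_succ_eq_map]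
    rw [List.filter_cons]
    simp only [List.filter_map]
    have hshift : ((fun k => ((d :: u)[k]? == some '.') && ((c :: d :: u)[k]? == (d :: u)[k]?)) ∘ (· + 1))
        = fun k => (u[k]? == some '.') && ((d :: u)[k]? == u[k]?) := by
      funext k; simp
    rw [hshift, ih]
    have hz : (((d :: u)[0]? == some '.') && ((c :: d :: u)[0]? == (d :: u)[0]?))
        = (d == '.' && c == '.') := by
      cases hd : (d == '.')
      · simp [hd]
      · have : d = '.' := by simpa using hd
        subst this; simp
    simp only [hz]
    by_cases hd : d = '.' <;> by_cases hc : c = '.' <;>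
      simp [pvBadN, hd, hc]

theorem pv_idxs_full (s : List Char) :
    (PySem.List.pyRange 1 (PySem.List.len s) 1).foldl
      (fun acc i => if PySem.List.pyGet? s i == some '.' && PySem.List.pyGet? s (i-1) == PySem.List.pyGet? s i
                    then acc ++ [i] else acc) ([] : List Int)
      = (pvBadN false s).map (fun k : Nat => (k : Int)) := by
  rw [PySem.List.foldl_append_if_eq_filter]
  cases s with
  | nil =>
    rw [PySem.List.pyRange_one_eq_nil (by simp [PySem.List.len])]
    simp [pvBadN]
  | cons c t =>
    have hlen : PySem.List.len (c :: t) = ((t.length + 1 : Nat) : Int) := by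
      simp [PySem.List.len]
    rw [hlen, PySem.List.pyRange_one]
    have : (((t.length + 1 : Nat) : Int) - 1).toNat = t.length := by omega
    rw [this, List.filter_map]
    have hP : ((fun i => PySem.List.pyGet? (c :: t) i == some '.' &&
          PySem.List.pyGet? (c :: t) (i-1) == PySem.List.pyGet? (c :: t) i) ∘ (fun k : Nat => 1 + (k : Int)))
        = fun k => (t[k]? == some '.') && ((c :: t)[k]? == t[k]?) := by
      funext k
      have h1 : (1 + (k : Int)) = ((k + 1 : Nat) : Int) := by omega
      simp only [Function.comp_apply, h1, PySem.List.pyGet?_natCast]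
      simp
    rw [hP, pv_idx_eq]
    have : pvBadN false (c :: t) = (pvBadN (c == '.') t).map (· + 1) := by
      simp [pvBadN]
    rw [this, List.map_map]
    apply List.map_congr_left
    intro k _
    simp; omega

theorem pv_scan_eq (l : List Char) (acc : List Char) (p : Option Char) :
    (l.foldl (fun (st : List Char × Option Char) c =>
        if pvKeep c then
          (if c == '.' && st.2 == some '.' then st.1 else st.1 ++ [c], some c)
        else st) (acc, p)).1 = acc ++ pvGB (p == some '.') (l.filter pvKeep) := by
  induction l generalizing acc p with
  | nil => simp [pvGB]
  | cons c t ih =>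
    by_cases hk : pvKeep c
    · simp only [List.foldl_cons, hk, if_true, List.filter_cons_of_pos hk]
      by_cases hd : (c == '.' && p == some '.') = true
      · have hc : (c == '.') = true := by
          cases hq : (c == '.') <;> simp [hq] at hd ⊢
        have hp : (p == some '.') = true := by
          cases hq : (p == some '.') <;> simp [hq] at hd ⊢
        simp only [hd, if_true, ih]
        simp [pvGB, hp, hc]
      · have hd' : (c == '.' && p == some '.') = false := by simpa using hd
        simp only [hd', Bool.false_eq_true, if_false, ih]
        simp only [pvGB, hd']
        simp
    · simp only [List.foldl_cons, hk, Bool.false_eq_true, if_false, List.filter_cons_of_neg hk, ih]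


theorem pv_gb_chain (pd : Bool) (l : List Char) :
    (pvGB pd l).IsChain pvR ∧ (pd = true → (pvGB pd l).head? ≠ some '.') := by
  induction l generalizing pd with
  | nil => simp [pvGB]
  | cons c t ih =>
    by_cases hd : (c == '.' && pd) = true
    · have hc : c = '.' := by
        cases hq : (c == '.') <;> simp [hq] at hd; simpa using hq
      have hp : pd = true := by cases pd <;> simp_all
      simp only [pvGB, hd, if_true]
      obtain ⟨h1, h2⟩ := ih (pd := (c == '.'))
      simp only [hc] at h1 h2 ⊢
      exact ⟨h1, fun _ => h2 (by simp)⟩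
    · simp only [pvGB, hd, Bool.false_eq_true, if_false]
      obtain ⟨h1, h2⟩ := ih (pd := (c == '.'))
      constructor
      · rw [List.isChain_cons]
        refine ⟨?_, h1⟩
        intro y hy
        unfold pvR
        rintro ⟨rfl, rfl⟩
        exact h2 (by simp) hy
      · intro hpd
        have : ¬(c = '.') := by
          intro hc; apply hd; simp [hc, hpd]
        simpa using this

theorem pv_rc_eq (u : List Char) :
    pvRemoveComma u = if u.head? = some '.' then u.tail
      else if u.getLast? = some '.' then u.dropLast else u := by
  unfold pvRemoveComma
  rcases u with _ | ⟨a, t⟩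
  · simp
  · simp only [List.length_cons, PySem.List.pyGet?_zero, PySem.List.pyGet?_neg_one,
      PySem.List.slice_from_one, PySem.List.slice_to_neg_one]
    rw [if_pos (by omega : t.length + 1 ≠ 0)]
    by_cases h1 : a = '.'
    · simp [h1]
    · have hh : ¬((a :: t).head? = some '.') := by simpa using h1
      by_cases h2 : (a :: t).getLast? = some '.' <;> simp [h1, h2]

theorem pv_dropWhile (m : List Char) (h : m.IsChain pvR) :
    m.dropWhile (fun c => (['.'] : List Char).contains c) =
      if m.head? = some '.' then m.tail else m := by
  rcases m with _ | ⟨a, t⟩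
  · simp
  · by_cases ha : a = '.'
    · subst ha
      simp only [List.head?_cons, List.tail_cons]
      rw [List.dropWhile_cons_of_pos (by simp)]
      rcases t with _ | ⟨b, u⟩
      · simp
      · have hb : ¬ b = '.' := by
          rw [List.isChain_cons_cons] at h
          intro hb; exact h.1 ⟨rfl, hb⟩
        rw [List.dropWhile_cons_of_neg (by simp [hb])]
        simp
    · rw [List.dropWhile_cons_of_neg (by simp [ha])]
      simp [ha]

theorem pv_chain_rev (m : List Char) (h : m.IsChain pvR) : m.reverse.IsChain pvR := by
  rw [List.isChain_reverse]
  exact h.imp (fun _ _ hab => fun ⟨x, y⟩ => hab ⟨y, x⟩)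

theorem pv_strip_eq (m : List Char) (h : m.IsChain pvR) :
    PySem.Chars.stripChars m ['.'] =
      (if (if m.head? = some '.' then m.tail else m).getLast? = some '.'
        then (if m.head? = some '.' then m.tail else m).dropLast
        else (if m.head? = some '.' then m.tail else m)) := by
  show (List.dropWhile (fun c => (['.'] : List Char).contains c)
      (List.dropWhile (fun c => (['.'] : List Char).contains c) m).reverse).reverse = _
  rw [pv_dropWhile m h]
  set u := if m.head? = some '.' then m.tail else m with hu
  have hcu : u.IsChain pvR := by
    rw [hu]; split
    · exact h.tail
    · exact h
  rw [pv_dropWhile u.reverse (pv_chain_rev u hcu)]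
  rw [List.head?_reverse]
  by_cases hl : u.getLast? = some '.'
  · simp [hl]
  · simp [hl]

theorem pv_head_tail (m : List Char) (hm : m.IsChain pvR) (hh : m.head? = some '.') :
    m.tail.head? ≠ some '.' := by
  rcases m with _ | ⟨a, t⟩
  · simp at hh
  · rcases t with _ | ⟨b, u⟩
    · simp
    · have ha : a = '.' := by simpa using hh
      rw [List.isChain_cons_cons] at hm
      have hb : ¬ b = '.' := fun hb => hm.1 ⟨ha, hb⟩
      simpa using hb

theorem pv_head_dropLast (m : List Char) (hh : m.head? ≠ some '.') :
    m.dropLast.head? ≠ some '.' := by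
  rcases m with _ | ⟨a, t⟩
  · simp
  · rcases t with _ | ⟨b, u⟩
    · simp
    · rw [List.dropLast_cons₂]
      simpa using hh

theorem pv_last_dropLast (m : List Char) (hm : m.IsChain pvR) (hl : m.getLast? = some '.') :
    m.dropLast.getLast? ≠ some '.' := by
  have h1 := pv_head_tail m.reverse (pv_chain_rev m hm) (by simpa using hl)
  have h2 : m.reverse.tail = m.dropLast.reverse := by
    have : (m.reverse.tail).reverse = m.dropLast := by simp
    calc m.reverse.tail = ((m.reverse.tail).reverse).reverse := by simp
    _ = m.dropLast.reverse := by rw [this]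
  rw [h2] at h1
  simpa using h1

theorem pv_rcrc_eq_strip (m : List Char) (hm : m.IsChain pvR) :
    pvRemoveComma (pvRemoveComma m) = PySem.Chars.stripChars m ['.'] := by
  rw [pv_strip_eq m hm]
  by_cases hh : m.head? = some '.'
  · rw [pv_rc_eq m, if_pos hh, pv_rc_eq m.tail, if_neg (pv_head_tail m hm hh), if_pos hh]
  · rw [pv_rc_eq m, if_neg hh, if_neg hh]
    by_cases hl : m.getLast? = some '.'
    · rw [if_pos hl, pv_rc_eq m.dropLast, if_neg (pv_head_dropLast m hh),
        if_neg (pv_last_dropLast m hm hl)]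
    · rw [if_neg hl, pv_rc_eq m, if_neg hh, if_neg hl]


theorem pv_strip_facts (m : List Char) (hm : m.IsChain pvR) :
    (PySem.Chars.stripChars m ['.']).IsChain pvR ∧
      (PySem.Chars.stripChars m ['.']).head? ≠ some '.' ∧
      (PySem.Chars.stripChars m ['.']).getLast? ≠ some '.' := by
  rw [pv_strip_eq m hm]
  set u := if m.head? = some '.' then m.tail else m with hu
  have hcu : u.IsChain pvR := by
    rw [hu]; split
    · exact hm.tail
    · exact hm
  have hhu : u.head? ≠ some '.' := by
    rw [hu]; split
    · exact pv_head_tail m hm (by assumption)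
    · assumption
  by_cases hl : u.getLast? = some '.'
  · rw [if_pos hl]
    exact ⟨hcu.dropLast, pv_head_dropLast u hhu, pv_last_dropLast u hcu hl⟩
  · rw [if_neg hl]
    exact ⟨hcu, hhu, hl⟩

theorem pv_take_facts (r : List Char) (hc : r.IsChain pvR) (hh : r.head? ≠ some '.') :
    PySem.Chars.stripChars (r.take 15) ['.'] = pvRemoveComma (r.take 15) := by
  have hct : (r.take 15).IsChain pvR := hc.take 15
  have hht : (r.take 15).head? ≠ some '.' := by
    rw [List.head?_take]; simpa using hh
  rw [pv_strip_eq _ hct, if_neg hht, pv_rc_eq, if_neg hht]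

theorem pv_tail2 (r : List Char) (hc : r.IsChain pvR)
    (hh : r.head? ≠ some '.') (hl : r.getLast? ≠ some '.') :
    (let s4 := if r.length = 0 then r ++ ['a']
               else if 16 ≤ r.length then PySem.List.slice r none (some 15) else r;
     let s5 := pvRemoveComma s4;
     if s5.length ≤ 2 then s5 ++ List.replicate (3 - s5.length) (PySem.List.pyGetD s5 (-1) ' ') else s5)
    = (let s' := if r.length = 0 then ['a']
                 else if 16 ≤ r.length then PySem.Chars.stripChars (r.take 15) ['.'] else r;
       if s'.length ≤ 2 then s' ++ List.replicate (3 - s'.length) (PySem.List.pyGetD s' (-1) ' ') else s') := by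
  by_cases h0 : r.length = 0
  · have hr : r = [] := List.eq_nil_of_length_eq_zero h0
    subst hr
    decide
  · by_cases h16 : 16 ≤ r.length
    · show (let s5 := pvRemoveComma (if r.length = 0 then r ++ ['a']
               else if 16 ≤ r.length then PySem.List.slice r none (some 15) else r);
        if s5.length ≤ 2 then s5 ++ List.replicate (3 - s5.length) (PySem.List.pyGetD s5 (-1) ' ') else s5) = _
      simp only [h0, if_false, h16, if_true]
      have hsl : PySem.List.slice r none (some 15) = r.take 15 := by
        have := PySem.List.slice_to (xs := r) (b := 15) (by norm_num)
        simpa using this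
      rw [hsl, pv_take_facts r hc hh]
    · simp only [h0, if_false, h16, if_false]
      rw [pv_rc_eq r, if_neg hh, if_neg hl]

theorem pv_tail (m : List Char) (hm : m.IsChain pvR) :
    (let s3 := pvRemoveComma (pvRemoveComma m);
     let s4 := if s3.length = 0 then s3 ++ ['a']
               else if 16 ≤ s3.length then PySem.List.slice s3 none (some 15) else s3;
     let s5 := pvRemoveComma s4;
     if s5.length ≤ 2 then s5 ++ List.replicate (3 - s5.length) (PySem.List.pyGetD s5 (-1) ' ') else s5)
    = (let s := PySem.Chars.stripChars m ['.'];
       let s' := if s.length = 0 then ['a']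
                 else if 16 ≤ s.length then PySem.Chars.stripChars (s.take 15) ['.'] else s;
       if s'.length ≤ 2 then s' ++ List.replicate (3 - s'.length) (PySem.List.pyGetD s' (-1) ' ') else s') := by
  rw [pv_rcrc_eq_strip m hm]
  obtain ⟨hc, hh, hl⟩ := pv_strip_facts m hm
  exact pv_tail2 (PySem.Chars.stripChars m ['.']) hc hh hl

theorem pv_del_pyrange (s0 : List Char) :
    (PySem.List.pyRange 0 (PySem.List.len s0) 1).foldl
      (fun acc i => if pvKeep (PySem.List.pyGetD s0 i ' ') then acc else acc ++ [PySem.List.pyGetD s0 i ' ']) []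
      = s0.filter (fun c => !pvKeep c) := by
  rw [PySem.List.foldl_pyRange_zero_pyGetD s0 ' ' (fun acc x => if pvKeep x then acc else acc ++ [x]) []]
  simpa using pv_del_eq s0 []

theorem pv_step2 (s0 : List Char) :
    (s0.filter (fun c => !pvKeep c)).foldr (fun c s => s.filter (fun x => !(x == c))) s0
      = s0.filter pvKeep := by
  rw [pv_repl_eq]
  exact pv_filter_keep s0

theorem pv_step3 (s : List Char) :
    ((PySem.List.pyRange 1 (PySem.List.len s) 1).foldl
      (fun acc i => if PySem.List.pyGet? s i == some '.' && PySem.List.pyGet? s (i-1) == PySem.List.pyGet? s i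
                    then acc ++ [i] else acc) ([] : List Int)).foldr
      (fun i s => ((PySem.List.pop? s i).map (·.2)).getD s) s = pvGB false s := by
  rw [pv_idxs_full]
  have := pv_pop_gb false s
  simpa [pvPopf] using this

theorem pv_scan0 (l : List Char) :
    (l.foldl (fun (st : List Char × Option Char) c =>
        if pvKeep c then
          (if c == '.' && st.2 == some '.' then st.1 else st.1 ++ [c], some c)
        else st) ([], none)).1 = pvGB false (l.filter pvKeep) := by
  simpa using pv_scan_eq l [] none

theorem pv_main (new_id : String) : solution new_id = solution_alt new_id := by
  unfold solution solution_alt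
  simp only [pv_del_pyrange, pv_step2, pv_step3, pv_scan0]
  exact congrArg String.ofList
    (pv_tail (pvGB false ((PySem.Chars.lower new_id.toList).filter pvKeep))
      ((pv_gb_chain false _).1))

-- ===== VERDICT (by name: the statement is the Claim_ definition above) =====
theorem solution_spec : Claim_equal_solution := by
  intro new_id _
  unfold Spec_solution
  exact pv_main new_id
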